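-- pv_equiv track=rewrite | github.com/Jmeshesha/3d-tic-tac-toe | PythonServer/nextMove.py | counting_neighbors_eval_function
-- ===== SOURCE A (Python) =====
-- def counting_neighbors_eval_function(new_board, currPlayer, n):
--     score = 0
--     for plane, plane_value in enumerate(new_board):
--         for row, row_value in enumerate(plane_value):
--             for col, col_value in enumerate(row_value):
--                 if col_value == currPlayer:
--                     score += 1
--                 if col_value != currPlayer and col_value != " ":
--                     score -= 1
--     return score
-- ===== SOURCE B (Python) =====
-- def counting_neighbors_eval_function(new_board, currPlayer, n):
--     counts = {}
--     for plane in new_board: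
--         for row in plane:
--             for cell in row:
--                 counts[cell] = counts.get(cell, 0) + 1
--     score = 0
--     for sym, c in counts.items():
--         if sym == currPlayer:
--             score += c
--         elif sym != " ":
--             score -= c
--     return score
-- ===== Notes on version B (the rewrite author's own statement) =====
-- stated objective: alternative
-- what changed: Instead of branching twice per cell inside triple nested loops, B builds a symbol-count dictionary in one flat pass and then scores each distinct symbol once from the counter's items (add count for currPlayer, subtract counts of the other non-space symbols).
import Mathlib
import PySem

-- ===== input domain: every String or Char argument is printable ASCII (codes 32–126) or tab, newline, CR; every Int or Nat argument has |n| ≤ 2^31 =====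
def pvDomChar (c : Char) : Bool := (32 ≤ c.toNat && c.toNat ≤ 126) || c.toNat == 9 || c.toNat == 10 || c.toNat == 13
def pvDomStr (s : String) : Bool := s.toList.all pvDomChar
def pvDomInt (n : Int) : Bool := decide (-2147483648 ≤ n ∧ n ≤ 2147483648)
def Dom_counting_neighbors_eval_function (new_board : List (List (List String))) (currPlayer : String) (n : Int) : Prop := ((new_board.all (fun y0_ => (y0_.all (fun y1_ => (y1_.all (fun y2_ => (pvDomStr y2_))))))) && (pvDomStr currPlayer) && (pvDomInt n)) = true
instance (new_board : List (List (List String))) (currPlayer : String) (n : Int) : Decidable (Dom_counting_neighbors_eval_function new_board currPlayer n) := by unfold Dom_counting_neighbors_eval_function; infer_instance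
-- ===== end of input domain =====

-- B replaces the per-cell branching by a one-pass symbol counter scored over its distinct keys (alternative decomposition).
-- ===== PORT A =====
def counting_neighbors_eval_function (new_board : List (List (List String))) (currPlayer : String) (n : Int) : Int :=
  (PySem.List.enumerate new_board 0).foldl (fun score pp =>
    (PySem.List.enumerate pp.2 0).foldl (fun score rp =>
      (PySem.List.enumerate rp.2 0).foldl (fun score cp =>
        let score := if cp.2 = currPlayer then score + 1 else score
        if cp.2 ≠ currPlayer ∧ cp.2 ≠ " " then score - 1 else score) score) score) 0

-- ===== PORT B =====
def counting_neighbors_eval_function_alt (new_board : List (List (List String))) (currPlayer : String) (n : Int) : Int :=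
  let counts : PySem.Dict String Int :=
    new_board.foldl (fun d plane =>
      plane.foldl (fun d row =>
        row.foldl (fun d cell => d.insert cell (d.getD cell 0 + 1)) d) d) PySem.Dict.empty
  counts.items.foldl (fun score q =>
    if q.1 = currPlayer then score + q.2
    else if q.1 ≠ " " then score - q.2
    else score) 0

-- ===== PRECONDITION & SPEC =====
def Spec_counting_neighbors_eval_function (new_board : List (List (List String))) (currPlayer : String) (n : Int) (out : Int) : Prop := out = counting_neighbors_eval_function_alt new_board currPlayer n
instance (new_board : List (List (List String))) (currPlayer : String) (n : Int) (out : Int) : Decidable (Spec_counting_neighbors_eval_function new_board currPlayer n out) := by unfold Spec_counting_neighbors_eval_function; infer_instance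

-- ===== CLAIM (what is proved, stated in full; the proofs are below) =====
def Claim_equal_counting_neighbors_eval_function : Prop := ∀ (new_board : List (List (List String))) (currPlayer : String) (n : Int), Dom_counting_neighbors_eval_function new_board currPlayer n → Spec_counting_neighbors_eval_function new_board currPlayer n (counting_neighbors_eval_function new_board currPlayer n)

-- ===== LEMMAS AND PROOFS =====
-- per-cell weight both programs aggregate
def pvWgt (p x : String) : Int := if x = p then 1 else if x ≠ " " then -1 else 0

theorem cell_step (p x : String) (score : Int) :
    (let s := if x = p then score + 1 else score;
     if x ≠ p ∧ x ≠ " " then s - 1 else s) = score + pvWgt p x := by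
  by_cases h1 : x = p
  · simp [pvWgt, h1]
  · by_cases h2 : x = " "
    · rw [h2] at h1; simp [pvWgt, h1, h2]
    · simp [pvWgt, h1, h2]; omega

theorem row_sum (p : String) :
    ∀ (rv : List String) (s score : Int),
      (PySem.List.enumerate rv s).foldl (fun score cp =>
        let sc := if cp.2 = p then score + 1 else score
        if cp.2 ≠ p ∧ cp.2 ≠ " " then sc - 1 else sc) score
      = score + (rv.map (pvWgt p)).sum := by
  intro rv
  induction rv with
  | nil => intro s score; simp [PySem.List.enumerate_nil]
  | cons x xs ih =>
      intro s score
      simp only [PySem.List.enumerate_cons, List.foldl_cons, List.map_cons, List.sum_cons]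
      rw [ih (s + 1)]
      have := cell_step p x score
      simp only at this
      rw [this]; ring

theorem plane_sum (p : String) :
    ∀ (pv : List (List String)) (s score : Int),
      (PySem.List.enumerate pv s).foldl (fun score rp =>
        (PySem.List.enumerate rp.2 0).foldl (fun score cp =>
          let sc := if cp.2 = p then score + 1 else score
          if cp.2 ≠ p ∧ cp.2 ≠ " " then sc - 1 else sc) score) score
      = score + (pv.map (fun rv => (rv.map (pvWgt p)).sum)).sum := by
  intro pv
  induction pv with
  | nil => intro s score; simp [PySem.List.enumerate_nil]
  | cons rv rest ih =>
      intro s score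
      simp only [PySem.List.enumerate_cons, List.foldl_cons, List.map_cons, List.sum_cons]
      rw [ih (s + 1), row_sum p rv 0 score]; ring

theorem a_eq_sum (nb : List (List (List String))) (p : String) (n : Int) :
    counting_neighbors_eval_function nb p n = ((nb.flatten.flatten).map (pvWgt p)).sum := by
  unfold counting_neighbors_eval_function
  have hb : ∀ (b : List (List (List String))) (s score : Int),
      (PySem.List.enumerate b s).foldl (fun score pp =>
        (PySem.List.enumerate pp.2 0).foldl (fun score rp =>
          (PySem.List.enumerate rp.2 0).foldl (fun score cp =>
            let sc := if cp.2 = p then score + 1 else score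
            if cp.2 ≠ p ∧ cp.2 ≠ " " then sc - 1 else sc) score) score) score
      = score + (b.map (fun pv => (pv.map (fun rv => (rv.map (pvWgt p)).sum)).sum)).sum := by
    intro b
    induction b with
    | nil => intro s score; simp [PySem.List.enumerate_nil]
    | cons pv rest ih =>
        intro s score
        simp only [PySem.List.enumerate_cons, List.foldl_cons, List.map_cons, List.sum_cons]
        rw [ih (s + 1), plane_sum p pv 0 score]; ring
  rw [hb nb 0 0, zero_add]
  simp [List.map_flatten, List.sum_flatten, Function.comp_def]

theorem item_step (p : String) (q : String × Int) (score : Int) :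
    (if q.1 = p then score + q.2 else if q.1 ≠ " " then score - q.2 else score)
      = score + q.2 * pvWgt p q.1 := by
  by_cases h1 : q.1 = p
  · simp [pvWgt, h1]
  · by_cases h2 : q.1 = " "
    · rw [h2] at h1 ⊢; simp [pvWgt, h1]
    · simp [pvWgt, h1, h2]; omega

theorem count_sum (p : String) (xs : List String) :
    ((PySem.Set.ofList xs).map (fun k => ((xs.count k : Int)) * pvWgt p k)).sum
      = (xs.map (pvWgt p)).sum := by
  rw [← List.sum_toFinset _ (PySem.Set.nodup_ofList xs)]
  have hfs : (PySem.Set.ofList xs).toFinset = xs.toFinset := by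
    apply Finset.ext; intro a
    simp [List.mem_toFinset, PySem.Set.mem_ofList]
  rw [hfs, Finset.sum_list_map_count]
  apply Finset.sum_congr rfl
  intro m _
  rw [nsmul_eq_mul]

theorem b_eq_sum (nb : List (List (List String))) (p : String) (n : Int) :
    counting_neighbors_eval_function_alt nb p n = ((nb.flatten.flatten).map (pvWgt p)).sum := by
  unfold counting_neighbors_eval_function_alt
  simp only
  rw [← List.foldl_flatten, ← List.foldl_flatten,
      PySem.Dict.foldl_insert_getD_add_one_eq_counter, PySem.Dict.items_counter]
  set xs := nb.flatten.flatten with hxs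
  have hfold : ∀ (l : List (String × Int)) (score : Int),
      l.foldl (fun score q =>
        if q.1 = p then score + q.2 else if q.1 ≠ " " then score - q.2 else score) score
      = score + (l.map (fun q => q.2 * pvWgt p q.1)).sum := by
    intro l
    induction l with
    | nil => intro score; simp
    | cons q rest ih =>
        intro score
        simp only [List.foldl_cons, List.map_cons, List.sum_cons]
        rw [ih, item_step p q score]; ring
  rw [hfold, List.map_map, zero_add]
  have : ((fun q : String × Int => q.2 * pvWgt p q.1) ∘ fun k => (k, (xs.count k : Int)))
      = fun k => ((xs.count k : Int)) * pvWgt p k := rfl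
  rw [this, count_sum]

-- ===== VERDICT (by name: the statement is the Claim_ definition above) =====
theorem counting_neighbors_eval_function_spec : Claim_equal_counting_neighbors_eval_function := by
  intro nb p n _
  unfold Spec_counting_neighbors_eval_function
  rw [a_eq_sum, b_eq_sum]
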